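-- pv_equiv track=rewrite | github.com/DataONEorg/examples.dataone.org | d1_examples/solr_json.py | getAuthorText
-- ===== SOURCE A (Python) =====
-- def getAuthorText(origin):
--     if not isinstance(origin, list):
--         return ""
--     if len(origin) <= 0:
--         return ""
--     author_text = ""
--     for i in range(0, len(origin)):
--         if (i >= 5):
--             return author_text + ", et al"
--         if i > 0:
--             if len(origin) > 2:
--                 author_text += ", "
--             if i+1 == len(origin):
--                 author_text += " and"
--             if len(origin) > 1:
--                 author_text += " "
--         author_text += origin[i]
--     return author_text
-- ===== SOURCE B (Python) =====
-- def getAuthorText(origin):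
--     if not isinstance(origin, list) or not origin:
--         return ""
--     n = len(origin)
--     if n == 1:
--         return "" + origin[0]
--     if n == 2:
--         return origin[0] + " and " + origin[1]
--     if n >= 6:
--         return ",  ".join(origin[:5]) + ", et al"
--     return ",  ".join(origin[:-1]) + ",  and " + origin[-1]
-- ===== Notes on version B (the rewrite author's own statement) =====
-- stated objective: simpler
-- what changed: Replaced A's single index loop that re-tests position/length conditions and accumulates separator pieces character-group by character-group with a direct case analysis on len(origin) (0, 1, 2, 3-5, >=6) that emits each shape as one join over a slice plus a literal suffix.
import Mathlib
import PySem

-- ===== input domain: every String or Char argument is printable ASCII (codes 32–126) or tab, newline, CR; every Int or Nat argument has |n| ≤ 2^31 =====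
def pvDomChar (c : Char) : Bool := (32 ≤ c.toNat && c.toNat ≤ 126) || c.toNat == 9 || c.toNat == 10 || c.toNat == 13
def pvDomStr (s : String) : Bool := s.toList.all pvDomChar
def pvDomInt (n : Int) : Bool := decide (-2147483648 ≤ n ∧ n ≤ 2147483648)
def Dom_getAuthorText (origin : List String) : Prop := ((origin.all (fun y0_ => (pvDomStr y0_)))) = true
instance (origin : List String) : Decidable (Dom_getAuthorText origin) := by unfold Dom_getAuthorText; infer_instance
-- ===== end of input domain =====

-- B replaces A's per-index accumulation loop by a length-case analysis with batched joins over slices (objective: simpler).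

-- ===== PORT A =====
-- the loop `for i in range(0, len(origin))` with its early `return … + ", et al"`
def getAuthorTextGo (origin : List String) (i : Nat) (acc : String) : String :=
  if h : i < origin.length then
    if i ≥ 5 then acc ++ ", et al"
    else
      let acc1 :=
        if i > 0 then
          let a1 := if origin.length > 2 then acc ++ ", " else acc
          let a2 := if i + 1 = origin.length then a1 ++ " and" else a1
          if origin.length > 1 then a2 ++ " " else a2
        else acc
      getAuthorTextGo origin (i + 1) (acc1 ++ origin[i])
  else acc
termination_by origin.length - i

def getAuthorText (origin : List String) : String :=
  if origin.length ≤ 0 then "" else getAuthorTextGo origin 0 ""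

-- ===== PORT B =====
-- str.join(sep, list), exact for the list case Python's ",  ".join covers
def pyJoin (sep : String) : List String → String
  | [] => ""
  | [x] => x
  | x :: xs => x ++ sep ++ pyJoin sep xs
def getAuthorText_alt (origin : List String) : String :=
  match origin with
  | [] => ""
  | [a] => "" ++ a
  | [a, b] => a ++ " and " ++ b
  | _ =>
    if origin.length ≥ 6 then
      pyJoin ",  " (origin.take 5) ++ ", et al"
    else
      pyJoin ",  " origin.dropLast ++ ",  and " ++ origin.getLastD ""

-- ===== PRECONDITION & SPEC =====
def Spec_getAuthorText (origin : List String) (out : String) : Prop := out = getAuthorText_alt origin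
instance (origin : List String) (out : String) : Decidable (Spec_getAuthorText origin out) := by unfold Spec_getAuthorText; infer_instance

-- ===== CLAIM (what is proved, stated in full; the proofs are below) =====
def Claim_equal_getAuthorText : Prop := ∀ (origin : List String), Dom_getAuthorText origin → Spec_getAuthorText origin (getAuthorText origin)

-- ===== LEMMAS AND PROOFS =====

-- ===== VERDICT (by name: the statement is the Claim_ definition above) =====
theorem getAuthorText_spec : Claim_equal_getAuthorText := by
  intro origin _
  unfold Spec_getAuthorText
  match origin with
  | [] => rfl
  | [a] => simp [getAuthorText, getAuthorTextGo, getAuthorText_alt]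
  | [a, b] => simp [getAuthorText, getAuthorTextGo, getAuthorText_alt, String.append_assoc]
  | [a, b, c] => simp [getAuthorText, getAuthorTextGo, getAuthorText_alt, pyJoin, String.append_assoc]
  | [a, b, c, d] => simp [getAuthorText, getAuthorTextGo, getAuthorText_alt, pyJoin, String.append_assoc]
  | [a, b, c, d, e] => simp [getAuthorText, getAuthorTextGo, getAuthorText_alt, pyJoin, String.append_assoc]
  | a :: b :: c :: d :: e :: f :: r =>
    have h6 : (a :: b :: c :: d :: e :: f :: r).length ≥ 6 := by simp
    simp [getAuthorText, getAuthorTextGo, getAuthorText_alt, pyJoin,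
      String.append_assoc, List.length_cons]
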